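-- pv_equiv track=rewrite | github.com/willwang-io/NonogramSolver | archive/one_line_solver.py | can_place_color
-- ===== SOURCE A (Python) =====
-- def can_place_color(cells, clr, l_bound, r_bound):
--     """Determines the possibility of filling the cells in an intervals,
--     inclusive with a certain color.
--
--     Args:
--         cells: list of integers, the state of the line
--         clr: color
--         l_bound: integer, left bound of the interval
--         r_bound: integer, right bound of the interval
--
--     Returns:
--         True if possible, False otherwise.
--     """
--     if r_bound >= len(cells):
--         return False
--     mask = 1 << clr
--     # Paint a block of cells with a certain color iff it is possible for
--     # all cells to have this color (every cell from the block has color-th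
--     # bit set to 1).
--     for i in range(l_bound, r_bound + 1):
--         if (cells[i] & mask) == 0:
--             return False
--     return True
-- ===== SOURCE B (Python) =====
-- def can_place_color(cells, clr, l_bound, r_bound):
--     if r_bound >= len(cells):
--         return False
--     mask = 1 << clr
--
--     def ok(l, r):
--         # divide and conquer: every cell in [l, r] has the clr bit set
--         if l > r:
--             return True
--         if l == r:
--             return (cells[l] & mask) != 0
--         m = (l + r) // 2
--         return ok(l, m) and ok(m + 1, r)
--
--     return ok(l_bound, r_bound)
-- ===== Notes on version B (the rewrite author's own statement) =====
-- stated objective: alternative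
-- what changed: Replaces A's linear left-to-right scan with early return by a divide-and-conquer recursion that splits the interval at its floor midpoint and conjoins the two halves, testing the color bit only at singleton leaves.
import Mathlib
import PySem

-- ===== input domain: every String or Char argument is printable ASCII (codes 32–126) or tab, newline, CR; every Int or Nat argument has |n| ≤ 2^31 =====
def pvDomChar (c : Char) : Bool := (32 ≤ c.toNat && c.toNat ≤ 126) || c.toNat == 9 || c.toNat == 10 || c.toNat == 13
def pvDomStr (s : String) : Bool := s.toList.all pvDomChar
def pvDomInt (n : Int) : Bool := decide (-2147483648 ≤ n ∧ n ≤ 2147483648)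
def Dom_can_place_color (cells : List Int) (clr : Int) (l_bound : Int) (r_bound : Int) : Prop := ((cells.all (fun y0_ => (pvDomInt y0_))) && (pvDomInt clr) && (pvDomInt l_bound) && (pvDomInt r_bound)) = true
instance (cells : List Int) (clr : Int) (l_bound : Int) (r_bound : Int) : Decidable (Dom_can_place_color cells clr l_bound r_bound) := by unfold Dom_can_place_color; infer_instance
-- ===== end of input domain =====

-- B replaces A's linear early-return scan by a divide-and-conquer recursion that splits the
-- interval at its floor midpoint and conjoins both halves; alternative decomposition, same cost.


-- ===== PORT A =====
-- A's for-loop with early `return False`; cells[i] via pyGetD (the default 0 is never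
-- read under Pre_, which puts every visited index in range).
def canPlaceGo (cells : List Int) (mask : Int) : List Int → Bool
  | [] => true
  | i :: rest =>
      if PySem.Int.band (PySem.List.pyGetD cells i 0) mask == 0 then false
      else canPlaceGo cells mask rest

def can_place_color (cells : List Int) (clr : Int) (l_bound : Int) (r_bound : Int) : Bool :=
  if (cells.length : Int) ≤ r_bound then false
  else
    let mask : Int := 1 <<< clr.toNat   -- 1 << clr; clr ≥ 0 under Pre_ here
    canPlaceGo cells mask (PySem.List.pyRange l_bound (r_bound + 1) 1)

-- ===== PORT B =====
-- B's inner `ok(l, r)`: divide and conquer on the interval, splitting at the floor midpoint.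
-- Structural recursion on a fuel that bounds the interval length (a totality guard only:
-- with fuel ≥ (r - l).toNat the fuel never runs out, proved in pv_B_iff below).
def okGo (cells : List Int) (mask : Int) : Nat → Int → Int → Bool
  | fuel, l, r =>
    if r < l then true
    else if l = r then PySem.Int.band (PySem.List.pyGetD cells l 0) mask != 0
    else
      match fuel with
      | 0 => true
      | fuel + 1 =>
          okGo cells mask fuel l (PySem.Int.floordiv (l + r) 2) &&
          okGo cells mask fuel (PySem.Int.floordiv (l + r) 2 + 1) r

def can_place_color_alt (cells : List Int) (clr : Int) (l_bound : Int) (r_bound : Int) : Bool :=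
  if (cells.length : Int) ≤ r_bound then false
  else
    let mask : Int := 1 <<< clr.toNat
    okGo cells mask (r_bound - l_bound).toNat l_bound r_bound

-- ===== PRECONDITION & SPEC =====
-- Pre_ excludes exactly the inputs on which A raises: after the length guard passes,
-- clr < 0 makes `1 << clr` raise ValueError, and (with a non-empty interval) l_bound < -len(cells)
-- makes the first access cells[l_bound] raise IndexError.  B raises on the same inputs.
def Pre_can_place_color (cells : List Int) (clr : Int) (l_bound : Int) (r_bound : Int) : Prop :=
  (cells.length : Int) ≤ r_bound ∨
    (0 ≤ clr ∧ (l_bound ≤ r_bound → -(cells.length : Int) ≤ l_bound))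
instance (cells : List Int) (clr : Int) (l_bound : Int) (r_bound : Int) : Decidable (Pre_can_place_color cells clr l_bound r_bound) := by unfold Pre_can_place_color; infer_instance

def pvWitness_can_place_color : List Int × Int × Int × Int := ([3, 2, 3], 1, 0, 2)

def Spec_can_place_color (cells : List Int) (clr : Int) (l_bound : Int) (r_bound : Int) (out : Bool) : Prop := out = can_place_color_alt cells clr l_bound r_bound
instance (cells : List Int) (clr : Int) (l_bound : Int) (r_bound : Int) (out : Bool) : Decidable (Spec_can_place_color cells clr l_bound r_bound out) := by unfold Spec_can_place_color; infer_instance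

-- ===== CLAIM (what is proved, stated in full; the proofs are below) =====
def Claim_equal_can_place_color : Prop := ∀ (cells : List Int) (clr : Int) (l_bound : Int) (r_bound : Int), Dom_can_place_color cells clr l_bound r_bound → Pre_can_place_color cells clr l_bound r_bound → Spec_can_place_color cells clr l_bound r_bound (can_place_color cells clr l_bound r_bound)

-- ===== LEMMAS AND PROOFS =====

theorem pv_ldiff_zero (n : Nat) : Nat.ldiff 0 n = 0 :=
  Nat.eq_of_testBit_eq (by simp)

theorem pv_and_add_ldiff : ∀ m n : Nat, (m &&& n) + Nat.ldiff m n = m := by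
  intro m
  induction m using Nat.binaryRec with
  | zero => intro n; simp [pv_ldiff_zero]
  | bit b m ih =>
      intro n
      rw [← Nat.bit_bodd_div2 n, Nat.land_bit, Nat.ldiff_bit, Nat.bit_val, Nat.bit_val, Nat.bit_val]
      have h := ih n.div2
      cases b <;> cases Nat.bodd n <;> simp <;> omega

-- PySem's Python-exact `&` agrees with Mathlib's Int.land.
theorem pv_band_eq_land : ∀ (a b : Int), PySem.Int.band a b = Int.land a b := by
  intro a b
  cases a with
  | ofNat m =>
      cases b with
      | ofNat n => rfl
      | negSucc n =>
          have h2 : ¬ (0:Int) ≤ Int.negSucc n := by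
            simp [Int.negSucc_eq]; omega
          have hland : Int.land ((m : Nat) : Int) (Int.negSucc n) = ((Nat.ldiff m n : Nat) : Int) := rfl
          have hneg : (-(Int.negSucc n) - 1) = (n : Int) := by
            rw [Int.negSucc_eq]; ring
          simp only [PySem.Int.band, h2, if_false, Int.ofNat_eq_natCast,
            Int.natCast_nonneg, if_pos, hneg, Int.toNat_natCast]
          rw [hland]
          have h := pv_and_add_ldiff m n
          have e : m - (m &&& n) = Nat.ldiff m n := by omega
          rw [e]
  | negSucc m =>
      cases b with
      | ofNat n =>
          have h2 : ¬ (0:Int) ≤ Int.negSucc m := by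
            simp [Int.negSucc_eq]; omega
          have hland : Int.land (Int.negSucc m) ((n : Nat) : Int) = ((Nat.ldiff n m : Nat) : Int) := rfl
          have hneg : (-(Int.negSucc m) - 1) = (m : Int) := by
            rw [Int.negSucc_eq]; ring
          simp only [PySem.Int.band, h2, if_false, Int.ofNat_eq_natCast,
            Int.natCast_nonneg, if_pos, hneg, Int.toNat_natCast]
          rw [hland]
          have h := pv_and_add_ldiff n m
          have e : n - (n &&& m) = Nat.ldiff n m := by omega
          rw [e]
      | negSucc n =>
          have h2 : ¬ (0:Int) ≤ Int.negSucc m := by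
            simp [Int.negSucc_eq]; omega
          have h3 : ¬ (0:Int) ≤ Int.negSucc n := by
            simp [Int.negSucc_eq]; omega
          have hland : Int.land (Int.negSucc m) (Int.negSucc n) = Int.negSucc (m ||| n) := rfl
          have hm : (-(Int.negSucc m) - 1) = (m : Int) := by rw [Int.negSucc_eq]; ring
          have hn : (-(Int.negSucc n) - 1) = (n : Int) := by rw [Int.negSucc_eq]; ring
          simp only [PySem.Int.band, h2, h3, if_false, hm, hn, Int.toNat_natCast]
          rw [hland, Int.negSucc_eq]
          ring

theorem pv_ldiff_two_pow (n k : Nat) : Nat.ldiff (2 ^ k) n ≠ 0 ↔ n.testBit k = false := by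
  by_cases h : n.testBit k
  · constructor
    · intro hne
      exfalso; apply hne
      apply Nat.eq_of_testBit_eq
      intro i
      simp only [Nat.testBit_ldiff, Nat.testBit_two_pow, Nat.zero_testBit]
      by_cases hik : k = i
      · subst hik; simp [h]
      · simp [hik]
    · intro hf; simp [h] at hf
  · constructor
    · intro _; simpa using h
    · intro _ h0
      have := congrArg (fun m => Nat.testBit m k) h0
      simp [Nat.testBit_ldiff, h] at this

theorem pv_land_two_pow (x : Int) (k : Nat) :
    Int.land x ((2 ^ k : Nat) : Int) ≠ 0 ↔ x.testBit k = true := by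
  cases x with
  | ofNat m =>
      have h1 : Int.land (Int.ofNat m) ((2 ^ k : Nat) : Int) = Int.ofNat (m &&& 2 ^ k) := rfl
      rw [h1]
      have h2 : m &&& 2 ^ k = (m.testBit k).toNat * 2 ^ k := Nat.and_two_pow m k
      cases h : m.testBit k <;>
        simp [h2, h, Int.testBit]
  | negSucc m =>
      have h1 : Int.land (Int.negSucc m) ((2 ^ k : Nat) : Int) = Int.ofNat (Nat.ldiff (2 ^ k) m) := rfl
      rw [h1]
      have h3 : Int.testBit (Int.negSucc m) k = !m.testBit k := rfl
      rw [h3]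
      constructor
      · intro hne
        have : Nat.ldiff (2 ^ k) m ≠ 0 := by
          intro h0; apply hne; simp [h0]
        simp [(pv_ldiff_two_pow m k).mp this]
      · intro hb
        have hf : m.testBit k = false := by
          cases h : m.testBit k
          · rfl
          · rw [h] at hb; simp at hb
        have := (pv_ldiff_two_pow m k).mpr hf
        simpa [Int.ofNat_eq_zero] using this

theorem pv_shift_pow (k : Nat) : (((1 <<< k : Nat) : Nat) : Int) = ((2 ^ k : Nat) : Int) := by
  norm_num [Nat.shiftLeft_eq]

-- The interval property both programs decide: every cell of [l, r] has bit k set.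
def pvAllBit (cells : List Int) (k : Nat) (l r : Int) : Prop :=
  ∀ i : Int, l ≤ i → i ≤ r → (PySem.List.pyGetD cells i 0).testBit k = true

theorem pv_canGo_cons (cells : List Int) (mask i : Int) (rest : List Int) :
    canPlaceGo cells mask (i :: rest) = true ↔
      (Int.land (PySem.List.pyGetD cells i 0) mask ≠ 0 ∧ canPlaceGo cells mask rest = true) := by
  rw [canPlaceGo]
  rw [pv_band_eq_land]
  by_cases h : Int.land (PySem.List.pyGetD cells i 0) mask = 0
  · simp [h]
  · simp [h]

-- A's scan decides pvAllBit.
theorem pv_A_iff (cells : List Int) (k : Nat) : ∀ (n : Nat) (l r : Int), (r + 1 - l).toNat = n →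
    (canPlaceGo cells ((2 ^ k : Nat) : Int) (PySem.List.pyRange l (r + 1) 1) = true ↔
      pvAllBit cells k l r) := by
  intro n
  induction n with
  | zero =>
      intro l r hn
      rw [PySem.List.pyRange_one_eq_nil (by omega)]
      rw [canPlaceGo]
      constructor
      · intro _ i hli hir; omega
      · intro _; trivial
  | succ m ih =>
      intro l r hn
      have hlr : l ≤ r := by omega
      rw [PySem.List.pyRange_one_cons (by omega : l < r + 1)]
      rw [pv_canGo_cons, ih (l + 1) r (by omega), pv_land_two_pow]
      constructor
      · rintro ⟨h1, h2⟩ i hli hir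
        by_cases hi : i = l
        · subst hi; exact h1
        · exact h2 i (by omega) hir
      · intro h
        exact ⟨h l le_rfl hlr, fun i hli hir => h i (by omega) hir⟩

-- B's divide-and-conquer decides pvAllBit (whenever the fuel covers the interval length).
theorem pv_B_iff (cells : List Int) (k : Nat) : ∀ (fuel : Nat) (l r : Int), (r - l).toNat ≤ fuel →
    (okGo cells ((2 ^ k : Nat) : Int) fuel l r = true ↔ pvAllBit cells k l r) := by
  intro fuel
  induction fuel with
  | zero =>
      intro l r hfl
      rw [okGo]
      by_cases hrl : r < l
      · simp only [hrl, if_true]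
        constructor
        · intro _ i hli hir; omega
        · intro _; trivial
      · have hlr : l = r := by omega
        subst hlr
        have key : (PySem.Int.band (PySem.List.pyGetD cells l 0) ((2 ^ k : Nat) : Int) != 0) = true
            ↔ (PySem.List.pyGetD cells l 0).testBit k = true := by
          rw [bne_iff_ne, pv_band_eq_land]; exact pv_land_two_pow _ _
        simp only [hrl, if_false, if_true]
        rw [key]
        constructor
        · intro h i hli hir
          have hi : i = l := by omega
          subst hi; exact h
        · intro h; exact h l le_rfl le_rfl
  | succ m ih =>
      intro l r hfl
      rw [okGo]
      by_cases hrl : r < l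
      · simp only [hrl, if_true]
        constructor
        · intro _ i hli hir; omega
        · intro _; trivial
      · by_cases hlr : l = r
        · subst hlr
          have key : (PySem.Int.band (PySem.List.pyGetD cells l 0) ((2 ^ k : Nat) : Int) != 0) = true
              ↔ (PySem.List.pyGetD cells l 0).testBit k = true := by
            rw [bne_iff_ne, pv_band_eq_land]; exact pv_land_two_pow _ _
          simp only [hrl, if_false, if_true]
          rw [key]
          constructor
          · intro h i hli hir
            have hi : i = l := by omega
            subst hi; exact h
          · intro h; exact h l le_rfl le_rfl
        · simp only [hrl, hlr, if_false, Bool.and_eq_true]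
          have hm := PySem.Int.floordiv_eq_ediv_of_pos (a := l + r) (by omega : (0:Int) < 2)
          have hl : l ≤ PySem.Int.floordiv (l + r) 2 := by rw [hm]; omega
          have hr : PySem.Int.floordiv (l + r) 2 < r := by rw [hm]; omega
          rw [ih l (PySem.Int.floordiv (l + r) 2) (by omega),
              ih (PySem.Int.floordiv (l + r) 2 + 1) r (by omega)]
          constructor
          · rintro ⟨h1, h2⟩ i hli hir
            by_cases hi : i ≤ PySem.Int.floordiv (l + r) 2
            · exact h1 i hli hi
            · exact h2 i (by omega) hir
          · intro h
            exact ⟨fun i hli hir => h i hli (by omega),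
                   fun i hli hir => h i (by omega) hir⟩

-- ===== VERDICT (by name: the statement is the Claim_ definition above) =====
theorem can_place_color_spec : Claim_equal_can_place_color := by
  intro cells clr l_bound r_bound _ _
  unfold Spec_can_place_color can_place_color can_place_color_alt
  by_cases hg : (cells.length : Int) ≤ r_bound
  · simp [hg]
  · simp only [hg, if_false]
    rw [Bool.eq_iff_iff]
    simp only [pv_shift_pow]
    rw [pv_A_iff cells clr.toNat (r_bound + 1 - l_bound).toNat l_bound r_bound rfl,
        pv_B_iff cells clr.toNat (r_bound - l_bound).toNat l_bound r_bound le_rfl]
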